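-- pv_equiv track=rewrite | github.com/openhive-network/wax-spec-generator | python/api_client_generator/json_rpc/clean_openapi.py | collect_used
-- ===== SOURCE A (Python) =====
-- def collect_used(dependency_map: dict[str, set[str]], roots: set[str]) -> set[str]:
--     """Collects all models and aliases that are used in the such module."""
--     used = set(roots)
--     models_stack = list(roots)
--     while models_stack:
--         current = models_stack.pop()
--         for dep in dependency_map.get(current, []):
--             if dep not in used:
--                 used.add(dep)
--                 models_stack.append(dep)
--     return used
-- ===== SOURCE B (Python) =====
-- def collect_used(dependency_map: dict[str, set[str]], roots: set[str]) -> set[str]: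
--     """Collects all models and aliases that are used in the such module.
--
--     Recursive: for each node, gather its not-yet-seen dependencies in one
--     batch, mark them all, then drain that batch recursively."""
--     used = set(roots)
--
--     def visit(node):
--         new = [dep for dep in dependency_map.get(node, ()) if dep not in used]
--         used.update(new)
--         while new:
--             visit(new.pop())
--
--     for root in roots:
--         visit(root)
--     return used
-- ===== Notes on version B (the rewrite author's own statement) =====
-- stated objective: alternative
-- what changed: A's single explicit while-loop worklist is replaced by a recursive helper that filters a node's unseen dependencies in one comprehension, marks them with set.update, and drains that local batch recursively; the frontier lives on the call stack instead of one global mutable stack.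
import Mathlib
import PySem

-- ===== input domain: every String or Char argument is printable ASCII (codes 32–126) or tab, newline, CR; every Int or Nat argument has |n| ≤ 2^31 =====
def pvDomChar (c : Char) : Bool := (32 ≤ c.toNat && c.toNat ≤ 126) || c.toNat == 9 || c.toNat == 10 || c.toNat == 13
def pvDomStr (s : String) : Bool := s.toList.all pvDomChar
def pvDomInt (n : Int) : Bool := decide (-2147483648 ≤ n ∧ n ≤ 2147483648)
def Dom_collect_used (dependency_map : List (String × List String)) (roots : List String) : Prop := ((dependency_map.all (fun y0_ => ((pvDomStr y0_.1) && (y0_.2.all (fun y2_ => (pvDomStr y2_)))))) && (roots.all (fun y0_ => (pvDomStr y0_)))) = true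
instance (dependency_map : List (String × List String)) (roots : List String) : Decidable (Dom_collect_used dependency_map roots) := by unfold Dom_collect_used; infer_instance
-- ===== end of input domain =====

-- B replaces A's single explicit worklist loop by a recursive helper that filters a node's
-- unseen dependencies in one batch, marks them, then drains the batch recursively; same set.


-- ===== PORT A =====
-- 'for dep in dependency_map.get(current, []): if dep not in used: used.add(dep); models_stack.append(dep)'
def pvMarkDeps (used : PySem.Set String) (stack : List String) : List String → PySem.Set String × List String
  | [] => (used, stack)
  | dep :: deps =>
    if dep ∈ used then pvMarkDeps used stack deps
    else pvMarkDeps (used.add dep) (stack ++ [dep]) deps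

-- A's 'while models_stack:' loop; the fuel only makes it total in Lean
-- (the proofs show the supplied fuel is never exhausted). The dict values are
-- Python sets, so each looked-up value is read through its canonical element
-- list PySem.Set.ofList.
def pvCollectLoop (d : PySem.Dict String (List String)) : Nat → PySem.Set String → List String → PySem.Set String
  | 0, used, _ => used
  | fuel + 1, used, stack =>
    match PySem.List.pop? stack with
    | none => used
    | some (current, rest) =>
      let p := pvMarkDeps used rest (PySem.Set.ofList (d.getD current []))
      pvCollectLoop d fuel p.1 p.2

-- 'used = set(roots)'; 'models_stack = list(roots)' — roots is a Python set,
-- so the listed stack is its canonical element list.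
def collect_used (dependency_map : List (String × List String)) (roots : List String) : List String :=
  pvCollectLoop (PySem.Dict.mk dependency_map)
    (roots.length + 2 * (dependency_map.map (fun e => e.2.length)).sum + 1)
    (PySem.Set.ofList roots) (PySem.Set.ofList roots)

-- ===== PORT B =====
-- B's recursive 'visit'; the fuel only makes it total in Lean.
-- 'new = [dep for dep in dependency_map.get(node, ()) if dep not in used]' (the value is a
-- Python set, read through its canonical element list); 'used.update(new)';
-- 'while new: visit(new.pop())' — pop from the end = List.foldr over 'new'.
def pvVisit (d : PySem.Dict String (List String)) : Nat → PySem.Set String → String → PySem.Set String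
  | 0, used, _ => used
  | fuel + 1, used, node =>
    let new := (PySem.Set.ofList (d.getD node [])).filter (fun dep => decide (dep ∉ used))
    new.foldr (fun dep u => pvVisit d fuel u dep) (PySem.Set.update used new)

-- 'for root in roots:' iterates a Python set, whose order is unmodelled (PySem.Set);
-- we consume its canonical element list from the right.
def collect_used_alt (dependency_map : List (String × List String)) (roots : List String) : List String :=
  (PySem.Set.ofList roots).foldr
    (fun root u => pvVisit (PySem.Dict.mk dependency_map)
      ((dependency_map.map (fun e => e.2.length)).sum + 1) u root)
    (PySem.Set.ofList roots)

-- ===== PRECONDITION & SPEC =====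
def Spec_collect_used (dependency_map : List (String × List String)) (roots : List String) (out : List String) : Prop := out = collect_used_alt dependency_map roots
instance (dependency_map : List (String × List String)) (roots : List String) (out : List String) : Decidable (Spec_collect_used dependency_map roots out) := by unfold Spec_collect_used; infer_instance

-- ===== CLAIM (what is proved, stated in full; the proofs are below) =====
def Claim_equal_collect_used : Prop := ∀ (dependency_map : List (String × List String)) (roots : List String), Dom_collect_used dependency_map roots → Spec_collect_used dependency_map roots (collect_used dependency_map roots)

-- ===== LEMMAS AND PROOFS =====

-- all strings that ever appear as a dependency (with multiplicity)
def pvN (dm : List (String × List String)) : List String := (dm.map (fun e => e.2)).flatten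

-- how many dependency occurrences are not yet in 'used' — the termination budget
def pvMiss (N : List String) (u : PySem.Set String) : Nat := N.countP (fun x => !decide (x ∈ u))

lemma pvMiss_mono (N : List String) {u v : PySem.Set String} (h : ∀ y ∈ u, y ∈ v) :
    pvMiss N v ≤ pvMiss N u := by
  apply List.countP_mono_left
  intro a _ ha
  simp only [Bool.not_eq_true', decide_eq_false_iff_not] at *
  exact fun hm => ha (h a hm)

lemma pvMiss_add {N : List String} {u : PySem.Set String} {d : String}
    (hN : d ∈ N) (hu : d ∉ u) : pvMiss N (u.add d) + 1 ≤ pvMiss N u := by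
  induction N with
  | nil => cases hN
  | cons a t ih =>
    have hle : List.countP (fun x => !decide (x ∈ u.add d)) t ≤
        List.countP (fun x => !decide (x ∈ u)) t := by
      apply List.countP_mono_left
      intro b _ hb
      simp only [Bool.not_eq_true', decide_eq_false_iff_not, PySem.Set.mem_add] at *
      exact fun hm => hb (Or.inl hm)
    simp only [pvMiss, List.countP_cons] at *
    rcases List.mem_cons.mp hN with rfl | hmem
    · have h1 : (!decide (d ∈ u.add d)) = false := by simp [PySem.Set.mem_add]
      have h2 : (!decide (d ∈ u)) = true := by simp [hu]
      rw [h1, h2, if_neg Bool.false_ne_true, if_pos rfl]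
      omega
    · have hif : (if (!decide (a ∈ u.add d)) = true then 1 else 0) ≤
          (if (!decide (a ∈ u)) = true then 1 else 0) := by
        by_cases hau : a ∈ u
        · simp [PySem.Set.mem_add, hau]
        · by_cases had : a = d
          · simp [PySem.Set.mem_add, had]
          · simp [PySem.Set.mem_add, hau, had]
      have := ih hmem
      omega

lemma pvMarkDeps_mono (ds : List String) : ∀ (u : PySem.Set String) (out : List String)
    (y : String), y ∈ u → y ∈ (pvMarkDeps u out ds).1 := by
  induction ds with
  | nil => intro u out y hy; exact hy
  | cons d ds ih =>
    intro u out y hy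
    by_cases h : d ∈ u
    · simpa [pvMarkDeps, h] using ih u out y hy
    · simpa [pvMarkDeps, h] using ih (u.add d) (out ++ [d]) y
        ((PySem.Set.mem_add u d y).mpr (Or.inl hy))

lemma pvMarkDeps_acc (ds : List String) : ∀ (u : PySem.Set String) (out : List String),
    pvMarkDeps u out ds = ((pvMarkDeps u [] ds).1, out ++ (pvMarkDeps u [] ds).2) := by
  induction ds with
  | nil => intro u out; simp [pvMarkDeps]
  | cons d ds ih =>
    intro u out
    by_cases h : d ∈ u
    · simp only [pvMarkDeps, if_pos h]; exact ih u out
    · simp only [pvMarkDeps, if_neg h]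
      rw [ih (u.add d) (out ++ [d]), ih (u.add d) ([] ++ [d])]
      simp

lemma pvMarkDeps_miss {N : List String} (ds : List String) :
    ∀ (u : PySem.Set String), (∀ x ∈ ds, x ∈ N) →
    pvMiss N (pvMarkDeps u [] ds).1 + (pvMarkDeps u [] ds).2.length ≤ pvMiss N u := by
  induction ds with
  | nil => intro u _; simp [pvMarkDeps]
  | cons d ds ih =>
    intro u hds
    by_cases h : d ∈ u
    · simp only [pvMarkDeps, if_pos h]
      exact ih u (fun x hx => hds x (List.mem_cons_of_mem _ hx))
    · simp only [pvMarkDeps, if_neg h]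
      rw [pvMarkDeps_acc ds (u.add d) ([] ++ [d])]
      have h1 := ih (u.add d) (fun x hx => hds x (List.mem_cons_of_mem _ hx))
      have h2 := pvMiss_add (hds d List.mem_cons_self) h
      simp only [List.nil_append, List.singleton_append, List.length_cons]
      omega

-- on a duplicate-free list (a set's canonical element list), A's mark loop is
-- B's filter followed by set.update
lemma pvMarkDeps_eq_filter (ds : List String) : ds.Nodup →
    ∀ (u : PySem.Set String) (stack : List String),
    pvMarkDeps u stack ds =
      (PySem.Set.update u (ds.filter (fun x => decide (x ∉ u))),
       stack ++ ds.filter (fun x => decide (x ∉ u))) := by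
  induction ds with
  | nil => intro _ u stack; simp [pvMarkDeps, PySem.Set.update]
  | cons d ds ih =>
    intro hnd u stack
    obtain ⟨hd, hds⟩ := List.nodup_cons.mp hnd
    by_cases h : d ∈ u
    · have hfd : (decide (d ∉ u)) = false := by simp [h]
      simp only [pvMarkDeps, if_pos h, List.filter_cons, hfd]
      exact ih hds u stack
    · have hfd : (decide (d ∉ u)) = true := by simp [h]
      have hcongr : ds.filter (fun x => decide (x ∉ u.add d)) =
          ds.filter (fun x => decide (x ∉ u)) := by
        apply List.filter_congr
        intro x hx
        have hxd : x ≠ d := fun hxe => hd (hxe ▸ hx)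
        simp [PySem.Set.mem_add, hxd]
      simp only [pvMarkDeps, if_neg h, List.filter_cons, hfd]
      rw [ih hds (u.add d) (stack ++ [d]), hcongr]
      simp [PySem.Set.update]

-- unfolding of pvVisit at positive fuel, with the foldr turned into a foldl over the reverse
lemma pvVisit_succ (d : PySem.Dict String (List String)) (fuel : Nat)
    (u : PySem.Set String) (node : String) :
    pvVisit d (fuel + 1) u node =
      ((PySem.Set.ofList (d.getD node [])).filter (fun dep => decide (dep ∉ u))).reverse.foldl
        (fun acc dep => pvVisit d fuel acc dep)
        (PySem.Set.update u ((PySem.Set.ofList (d.getD node [])).filter (fun dep => decide (dep ∉ u)))) := by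
  simp only [pvVisit]
  rw [List.foldl_reverse]

-- pvVisit's arguments, written through pvMarkDeps (the dict value, read as a set, is nodup)
lemma pvVisit_succ_mark (d : PySem.Dict String (List String)) (fuel : Nat)
    (u : PySem.Set String) (node : String) :
    pvVisit d (fuel + 1) u node =
      (pvMarkDeps u [] (PySem.Set.ofList (d.getD node []))).2.reverse.foldl
        (fun acc dep => pvVisit d fuel acc dep)
        (pvMarkDeps u [] (PySem.Set.ofList (d.getD node []))).1 := by
  rw [pvVisit_succ,
    pvMarkDeps_eq_filter (PySem.Set.ofList (d.getD node [])) (PySem.Set.nodup_ofList _) u []]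
  simp

-- dependencies looked up in the dict all occur in pvN
lemma pvGet?_mem (dm : List (String × List String)) (k : String) (v : List String)
    (h : (PySem.Dict.mk dm).get? k = some v) : v ∈ dm.map (fun e => e.2) := by
  induction dm with
  | nil => simp [PySem.Dict.get?] at h
  | cons a t ih =>
    rw [PySem.Dict.get?_mk_cons] at h
    by_cases hk : (a.1 == k) = true
    · simp only [hk, if_true, Option.some.injEq] at h
      subst h; exact List.mem_map_of_mem List.mem_cons_self
    · simp only [hk] at h
      exact List.mem_cons_of_mem _ (ih h)

lemma pvGetD_sub (dm : List (String × List String)) (k : String) :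
    ∀ x ∈ PySem.Set.ofList ((PySem.Dict.mk dm).getD k []), x ∈ pvN dm := by
  intro x hx
  rw [PySem.Set.mem_ofList] at hx
  rw [PySem.Dict.getD_eq_get?_getD] at hx
  rcases h : (PySem.Dict.mk dm).get? k with _ | v
  · rw [h] at hx; simp at hx
  · rw [h] at hx
    simp only [Option.getD_some] at hx
    exact List.mem_flatten.mpr ⟨v, pvGet?_mem dm k v h, hx⟩

lemma pvVisit_mono (dm : List (String × List String)) :
    ∀ (f : Nat) (u : PySem.Set String) (x y : String), y ∈ u →
    y ∈ pvVisit (PySem.Dict.mk dm) f u x := by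
  intro f
  induction f with
  | zero => intro u x y hy; exact hy
  | succ f ih =>
    intro u x y hy
    rw [pvVisit_succ_mark]
    have h1 : y ∈ (pvMarkDeps u [] (PySem.Set.ofList ((PySem.Dict.mk dm).getD x []))).1 :=
      pvMarkDeps_mono _ u [] y hy
    generalize (pvMarkDeps u [] (PySem.Set.ofList ((PySem.Dict.mk dm).getD x []))).2.reverse = l
    generalize (pvMarkDeps u [] (PySem.Set.ofList ((PySem.Dict.mk dm).getD x []))).1 = u1 at h1
    induction l generalizing u1 with
    | nil => exact h1
    | cons a t iht => exact iht _ (ih u1 a y h1)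

lemma pvFoldCongrAux (dm : List (String × List String)) (f g bnd : Nat)
    (hIH : ∀ (u : PySem.Set String) (x : String), pvMiss (pvN dm) u ≤ bnd →
      pvVisit (PySem.Dict.mk dm) f u x = pvVisit (PySem.Dict.mk dm) g u x) :
    ∀ (l : List String) (u : PySem.Set String), pvMiss (pvN dm) u ≤ bnd →
    l.foldl (fun u y => pvVisit (PySem.Dict.mk dm) f u y) u =
    l.foldl (fun u y => pvVisit (PySem.Dict.mk dm) g u y) u := by
  intro l
  induction l with
  | nil => intro u _; rfl
  | cons a t ih =>
    intro u hu
    simp only [List.foldl_cons]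
    rw [hIH u a hu]
    exact ih _ (le_trans (pvMiss_mono _ (fun y hy => pvVisit_mono dm g u a y hy)) hu)

lemma pvVisit_fuel (dm : List (String × List String)) :
    ∀ (n : Nat) (u : PySem.Set String), pvMiss (pvN dm) u ≤ n →
    ∀ (f g : Nat) (x : String), pvMiss (pvN dm) u < f → pvMiss (pvN dm) u < g →
    pvVisit (PySem.Dict.mk dm) f u x = pvVisit (PySem.Dict.mk dm) g u x := by
  intro n
  induction n using Nat.strong_induction_on with
  | _ n IH =>
    intro u hn f g x hf hg
    match f, g with
    | f + 1, g + 1 =>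
      rw [pvVisit_succ_mark, pvVisit_succ_mark]
      set ds := PySem.Set.ofList ((PySem.Dict.mk dm).getD x []) with hdsdef
      have hsub : ∀ z ∈ ds, z ∈ pvN dm := pvGetD_sub dm x
      have hmm := pvMarkDeps_miss ds u hsub
      rcases hnew : (pvMarkDeps u [] ds).2 with _ | ⟨a0, t0⟩
      · rfl
      · rw [hnew] at hmm
        simp only [List.length_cons] at hmm
        apply pvFoldCongrAux dm f g (pvMiss (pvN dm) u - 1)
        · intro u' x' hb'
          exact IH (pvMiss (pvN dm) u - 1) (by omega) u' hb' f g x' (by omega) (by omega)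
        · omega

lemma pvFold_visit_fuel (dm : List (String × List String)) {f g : Nat}
    (l : List String) : ∀ (u : PySem.Set String), pvMiss (pvN dm) u < f →
    pvMiss (pvN dm) u < g →
    l.foldl (fun u x => pvVisit (PySem.Dict.mk dm) f u x) u =
    l.foldl (fun u x => pvVisit (PySem.Dict.mk dm) g u x) u := by
  induction l with
  | nil => intro u _ _; rfl
  | cons a t ih =>
    intro u hf hg
    simp only [List.foldl_cons]
    rw [pvVisit_fuel dm (pvMiss (pvN dm) u) u le_rfl f g a hf hg]
    apply ih
    · exact lt_of_le_of_lt (pvMiss_mono _ (fun y hy => pvVisit_mono dm g u a y hy)) hf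
    · exact lt_of_le_of_lt (pvMiss_mono _ (fun y hy => pvVisit_mono dm g u a y hy)) hg

-- the simulation: A's stack loop is B's recursion run over the reversed stack
lemma pvSim (dm : List (String × List String)) :
    ∀ (f : Nat) (u : PySem.Set String) (s : List String) (g : Nat),
    s.length + 2 * pvMiss (pvN dm) u < f → pvMiss (pvN dm) u < g →
    pvCollectLoop (PySem.Dict.mk dm) f u s =
    s.reverse.foldl (fun u x => pvVisit (PySem.Dict.mk dm) g u x) u := by
  intro f
  induction f with
  | zero => intro u s g hf _; omega
  | succ f ih =>
    intro u s g hf hg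
    rcases s.eq_nil_or_concat with rfl | ⟨s', x, rfl⟩
    · simp [pvCollectLoop, PySem.List.pop?]
    · simp only [List.concat_eq_append] at hf ⊢
      rw [pvCollectLoop, PySem.List.pop?_last]
      simp only
      set deps := PySem.Set.ofList ((PySem.Dict.mk dm).getD x []) with hdeps
      have hsub : ∀ z ∈ deps, z ∈ pvN dm := pvGetD_sub dm x
      rw [pvMarkDeps_acc deps u s']
      set u1 := (pvMarkDeps u [] deps).1 with hu1
      set nw := (pvMarkDeps u [] deps).2 with hnw
      have hmm : pvMiss (pvN dm) u1 + nw.length ≤ pvMiss (pvN dm) u :=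
        pvMarkDeps_miss deps u hsub
      obtain ⟨g', rfl⟩ : ∃ g', g = g' + 1 := ⟨g - 1, by omega⟩
      have hxstep : pvVisit (PySem.Dict.mk dm) (g' + 1) u x =
          nw.reverse.foldl (fun u y => pvVisit (PySem.Dict.mk dm) g' u y) u1 := by
        rw [pvVisit_succ_mark]
      have hbump : nw.reverse.foldl (fun u y => pvVisit (PySem.Dict.mk dm) g' u y) u1 =
          nw.reverse.foldl (fun u y => pvVisit (PySem.Dict.mk dm) (g' + 1) u y) u1 := by
        rcases List.eq_nil_or_concat nw with hnil | ⟨_, _, hcc⟩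
        · rw [hnil]; rfl
        · have hlen : 1 ≤ nw.length := by rw [hcc]; simp
          apply pvFold_visit_fuel dm nw.reverse u1 <;> omega
      calc pvCollectLoop (PySem.Dict.mk dm) f u1 (s' ++ nw)
          = (s' ++ nw).reverse.foldl (fun u y => pvVisit (PySem.Dict.mk dm) (g' + 1) u y) u1 := by
            apply ih
            · simp only [List.length_append, List.length_cons, List.length_nil] at hf ⊢
              omega
            · omega
        _ = (nw.reverse ++ s'.reverse).foldl (fun u y => pvVisit (PySem.Dict.mk dm) (g' + 1) u y) u1 := by
            rw [List.reverse_append]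
        _ = s'.reverse.foldl (fun u y => pvVisit (PySem.Dict.mk dm) (g' + 1) u y)
              (nw.reverse.foldl (fun u y => pvVisit (PySem.Dict.mk dm) (g' + 1) u y) u1) := by
            rw [List.foldl_append]
        _ = s'.reverse.foldl (fun u y => pvVisit (PySem.Dict.mk dm) (g' + 1) u y)
              (pvVisit (PySem.Dict.mk dm) (g' + 1) u x) := by
            rw [hxstep, hbump]
        _ = (s' ++ [x]).reverse.foldl (fun u y => pvVisit (PySem.Dict.mk dm) (g' + 1) u y) u := by
            rw [List.reverse_append]; rfl

lemma pvMiss_le_sum (dm : List (String × List String)) (u : PySem.Set String) :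
    pvMiss (pvN dm) u ≤ (dm.map (fun e => e.2.length)).sum := by
  calc pvMiss (pvN dm) u ≤ (pvN dm).length := List.countP_le_length
    _ = (dm.map (fun e => e.2.length)).sum := by
        simp [pvN, List.length_flatten, List.map_map, Function.comp_def]

lemma pvOfList_len (l : List String) : (PySem.Set.ofList l).length ≤ l.length := by
  suffices h : ∀ (s : PySem.Set String), (l.foldl PySem.Set.add s).length ≤ s.length + l.length by
    simpa [PySem.Set.ofList_eq_foldl] using h []
  induction l with
  | nil => intro s; simp
  | cons a t ih =>
    intro s
    have hadd : (s.add a).length ≤ s.length + 1 := by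
      by_cases h : a ∈ s <;> simp [PySem.Set.add, PySem.Set.contains, h]
    have := ih (s.add a)
    simp only [List.foldl_cons, List.length_cons]
    omega

-- ===== VERDICT (by name: the statement is the Claim_ definition above) =====
theorem collect_used_spec : Claim_equal_collect_used := by
  intro dependency_map roots _
  show collect_used dependency_map roots = collect_used_alt dependency_map roots
  unfold collect_used collect_used_alt
  rw [List.foldr_eq_foldl_reverse]
  have h := pvMiss_le_sum dependency_map (PySem.Set.ofList roots)
  have hlen := pvOfList_len roots
  exact pvSim dependency_map _ _ (PySem.Set.ofList roots) _ (by omega) (by omega)
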